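-- pv_equiv track=rewrite | github.com/Stephanie-Spears/LaunchCode | Unit1/counting.py | factors_dict
-- ===== SOURCE A (Python) =====
-- def factors_dict(num):
--     """generate dictionary, keys=num, val=factors of num"""
--     a_dict = {}
--     while num > 0:
--         a_list = []
--         for i in range(1, num + 1):
--             if num % i == 0:
--                 a_list.append(i)
--         a_dict[num] = a_list
--         num -= 1
--     return a_dict
-- ===== SOURCE B (Python) =====
-- def factors_dict(num):
--     """generate dictionary, keys=num, val=factors of num (divisor sieve)"""
--     lists = {}
--     for d in range(1, num + 1):
--         for m in range(d, num + 1, d):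
--             lists[m] = lists.get(m, []) + [d]
--     return {k: lists.get(k, []) for k in range(num, 0, -1)}
-- ===== Notes on version B (the rewrite author's own statement) =====
-- stated objective: faster
-- what changed: Replaces A's per-key trial division (for each k<=num, scan all i in 1..k) by a divisor sieve: one pass over d in 1..num appending d to the factor list of each multiple of d, then assembling the dict keys in descending order.
import Mathlib
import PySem

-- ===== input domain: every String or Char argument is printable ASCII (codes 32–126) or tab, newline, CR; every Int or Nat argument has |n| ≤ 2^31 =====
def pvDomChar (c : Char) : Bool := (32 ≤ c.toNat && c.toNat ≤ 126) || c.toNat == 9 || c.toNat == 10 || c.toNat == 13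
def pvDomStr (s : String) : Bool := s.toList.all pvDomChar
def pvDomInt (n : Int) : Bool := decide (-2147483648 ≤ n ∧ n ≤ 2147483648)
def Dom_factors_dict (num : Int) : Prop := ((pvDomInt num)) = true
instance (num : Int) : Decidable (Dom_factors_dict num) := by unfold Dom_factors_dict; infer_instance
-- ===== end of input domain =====

-- B replaces A's per-key trial division by a divisor sieve (one pass over divisors,
-- appending each to its multiples' lists); measured asymptotically faster.

-- ===== PORT A =====
-- the inner 'for i in range(1, num+1): if num % i == 0: a_list.append(i)' loop
def pvFactorsA (num : Int) : List Int :=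
  (PySem.List.pyRange 1 (num + 1) 1).foldl
    (fun a_list i => if PySem.Int.mod num i == 0 then a_list ++ [i] else a_list) []

-- the 'while num > 0' loop, state = (num, a_dict)
def factors_dict_go (num : Int) (a_dict : PySem.Dict Int (List Int)) :
    PySem.Dict Int (List Int) :=
  if 0 < num then
    factors_dict_go (num - 1) (a_dict.insert num (pvFactorsA num))
  else a_dict
termination_by num.toNat
decreasing_by omega

def factors_dict (num : Int) : List (Int × List Int) :=
  (factors_dict_go num PySem.Dict.empty).items

-- ===== PORT B =====
-- the sieve: for d in 1..num, for m in multiples of d up to num: lists[m] = lists.get(m, []) + [d]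
def pvSieve (num : Int) : PySem.Dict Int (List Int) :=
  (PySem.List.pyRange 1 (num + 1) 1).foldl
    (fun lists d =>
      (PySem.List.pyRange d (num + 1) d).foldl
        (fun lists m => lists.modify m [] (fun l => l ++ [d])) lists)
    PySem.Dict.empty

def factors_dict_alt (num : Int) : List (Int × List Int) :=
  let lists := pvSieve num
  ((PySem.List.pyRange num 0 (-1)).foldl
      (fun out k => out.insert k (lists.getD k [])) PySem.Dict.empty).items

-- ===== PRECONDITION & SPEC =====
def Spec_factors_dict (num : Int) (out : List (Int × List Int)) : Prop := out = factors_dict_alt num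
instance (num : Int) (out : List (Int × List Int)) : Decidable (Spec_factors_dict num out) := by unfold Spec_factors_dict; infer_instance

-- ===== CLAIM (what is proved, stated in full; the proofs are below) =====
def Claim_equal_factors_dict : Prop := ∀ (num : Int), Dom_factors_dict num → Spec_factors_dict num (factors_dict num)

-- ===== LEMMAS AND PROOFS =====

-- fold over a flatMap is the nested fold
theorem pv_foldl_flatMap {α β σ : Type} (g : α → List β) (f : σ → β → σ) :
    ∀ (l : List α) (init : σ),
      (l.flatMap g).foldl f init = l.foldl (fun a x => (g x).foldl f a) init := by
  intro l
  induction l with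
  | nil => intro init; simp
  | cons x xs ih => intro init; simp [List.flatMap_cons, List.foldl_append, ih]

def pvPairs (num : Int) : List (Int × Int) :=
  (PySem.List.pyRange 1 (num + 1) 1).flatMap
    (fun d => (PySem.List.pyRange d (num + 1) d).map (fun m => (m, d)))

theorem pvSieve_eq_pairs (num : Int) :
    pvSieve num = (pvPairs num).foldl
      (fun lists p => lists.modify p.1 [] (fun l => l ++ [p.2])) PySem.Dict.empty := by
  unfold pvSieve pvPairs
  rw [pv_foldl_flatMap]
  simp [List.foldl_map]

theorem pvSieve_getD (num k : Int) :
    (pvSieve num).getD k []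
      = ((pvPairs num).filter (fun p => p.1 == k)).map (fun p => p.2) := by
  rw [pvSieve_eq_pairs, PySem.Dict.getD_foldl_modify_append]
  simp

-- a Nodup list filtered by equality with k is [k] or []
theorem pv_filter_beq_nodup (k : Int) :
    ∀ (l : List Int), l.Nodup →
      l.filter (fun m => m == k) = if k ∈ l then [k] else [] := by
  intro l
  induction l with
  | nil => intro _; simp
  | cons x xs ih =>
      intro h
      rcases List.nodup_cons.mp h with ⟨hx, hxs⟩
      by_cases hxk : x = k
      · subst hxk
        simp [ih hxs, hx]
      · simp [hxk, ih hxs, List.mem_cons, Ne.symm hxk]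

theorem pv_nodup_pyRange_pos (a b s : Int) (hs : 0 < s) :
    (PySem.List.pyRange a b s).Nodup := by
  rw [PySem.List.pyRange_of_pos a b hs]
  refine List.Nodup.map ?_ List.nodup_range
  intro x y hxy
  have hxy' : a + s * (x : Int) = a + s * (y : Int) := hxy
  have h1 : s * (x : Int) = s * (y : Int) := by omega
  have h2 : (x : Int) = (y : Int) := mul_left_cancel₀ (by omega) h1
  exact_mod_cast h2

theorem pv_mem_multiples (num k d : Int) (hd : 0 < d) (_hk : 0 < k) (hkn : k ≤ num) :
    k ∈ PySem.List.pyRange d (num + 1) d ↔ d ≤ k ∧ d ∣ k := by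
  rw [PySem.List.mem_pyRange_iff_of_pos hd]
  constructor
  · rintro ⟨h1, _, h3⟩
    exact ⟨h1, by simpa using dvd_add h3 (dvd_refl d)⟩
  · rintro ⟨h1, h2⟩
    exact ⟨h1, by omega, dvd_sub h2 dvd_rfl⟩

theorem pv_flatMap_if_eq_filter (q : Int → Bool) :
    ∀ (l : List Int), (l.flatMap (fun d => if q d then [d] else [])) = l.filter q := by
  intro l
  induction l with
  | nil => simp
  | cons x xs ih =>
      by_cases hx : q x <;> simp [List.flatMap_cons, hx, ih]

theorem pv_flatMap_eq_nil {α β : Type} (g : α → List β) :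
    ∀ (l : List α), (∀ x ∈ l, g x = []) → l.flatMap g = [] := by
  intro l
  induction l with
  | nil => intro _; simp
  | cons x xs ih =>
      intro h
      simp [List.flatMap_cons, h x (by simp), ih (fun y hy => h y (by simp [hy]))]

theorem pv_flatMap_congr {α β : Type} (g g' : α → List β) :
    ∀ (l : List α), (∀ x ∈ l, g x = g' x) → l.flatMap g = l.flatMap g' := by
  intro l
  induction l with
  | nil => intro _; rfl
  | cons x xs ih =>
      intro h
      simp only [List.flatMap_cons, h x (by simp), ih (fun y hy => h y (by simp [hy]))]

-- the sieve's list at key k is exactly A's trial-division list, for 1 ≤ k ≤ num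
theorem pv_sieve_getD_eq_factorsA (num k : Int) (hk : 0 < k) (hkn : k ≤ num) :
    (pvSieve num).getD k [] = pvFactorsA k := by
  rw [pvSieve_getD]
  unfold pvPairs pvFactorsA
  rw [PySem.List.foldl_append_if_eq_filter (fun i => PySem.Int.mod k i == 0)]
  rw [List.nil_append, List.filter_flatMap, List.map_flatMap]
  have hsplit : PySem.List.pyRange 1 (num + 1) 1
      = PySem.List.pyRange 1 (k + 1) 1 ++ PySem.List.pyRange (k + 1) (num + 1) 1 :=
    PySem.List.pyRange_one_append 1 (k + 1) (num + 1) (by omega) (by omega)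
  rw [hsplit, List.flatMap_append]
  have htail : (PySem.List.pyRange (k + 1) (num + 1) 1).flatMap
      (fun d => ((PySem.List.pyRange d (num + 1) d).map (fun m => (m, d))
          |>.filter (fun p => p.1 == k)).map (fun p => p.2)) = [] := by
    apply pv_flatMap_eq_nil
    intro d hd
    rw [PySem.List.mem_pyRange_one] at hd
    rw [List.filter_map]
    have : (PySem.List.pyRange d (num + 1) d).filter
        ((fun p => p.1 == k) ∘ (fun m => ((m : Int), d))) = [] := by
      rw [show ((fun p => p.1 == k) ∘ (fun m => ((m : Int), d))) = (fun m => m == k) from rfl]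
      rw [pv_filter_beq_nodup k _ (pv_nodup_pyRange_pos d (num + 1) d (by omega))]
      rw [if_neg]
      intro hmem
      have := (pv_mem_multiples num k d (by omega) hk hkn).mp hmem
      omega
    rw [this]; simp
  rw [htail, List.append_nil]
  have hhead : (PySem.List.pyRange 1 (k + 1) 1).flatMap
      (fun d => ((PySem.List.pyRange d (num + 1) d).map (fun m => (m, d))
          |>.filter (fun p => p.1 == k)).map (fun p => p.2))
      = (PySem.List.pyRange 1 (k + 1) 1).flatMap
          (fun d => if PySem.Int.mod k d == 0 then [d] else []) := by
    apply pv_flatMap_congr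
    intro d hd
    rw [PySem.List.mem_pyRange_one] at hd
    rw [List.filter_map]
    rw [show ((fun p => p.1 == k) ∘ (fun m => ((m : Int), d))) = (fun m => m == k) from rfl]
    rw [pv_filter_beq_nodup k _ (pv_nodup_pyRange_pos d (num + 1) d (by omega))]
    by_cases hdvd : d ∣ k
    · rw [if_pos ((pv_mem_multiples num k d (by omega) hk hkn).mpr ⟨Int.le_of_dvd hk hdvd, hdvd⟩)]
      have : PySem.Int.mod k d = 0 := (PySem.Int.mod_eq_zero_iff_dvd k d).mpr hdvd
      simp [this]
    · rw [if_neg (fun hmem => hdvd ((pv_mem_multiples num k d (by omega) hk hkn).mp hmem).2)]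
      have : PySem.Int.mod k d ≠ 0 := fun h => hdvd ((PySem.Int.mod_eq_zero_iff_dvd k d).mp h)
      simp [this]
  rw [hhead, pv_flatMap_if_eq_filter]

-- A's while loop appends (k, factors k) for k = num, num-1, …, 1 to the dict
theorem pv_goA_items (num : Int) (d : PySem.Dict Int (List Int))
    (hfresh : ∀ j : Int, 0 < j → j ≤ num → d.contains j = false) :
    (factors_dict_go num d).items
      = d.items ++ (PySem.List.pyRange num 0 (-1)).map (fun k => (k, pvFactorsA k)) := by
  induction num, d using factors_dict_go.induct with
  | case1 num d hpos ih =>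
      rw [factors_dict_go, if_pos hpos]
      rw [ih (by
        intro j hj1 hj2
        rw [PySem.Dict.contains_insert]
        have hne : (j == num) = false := by
          simp only [beq_eq_false_iff_ne, ne_eq]
          omega
        rw [hne, hfresh j hj1 (by omega)]
        rfl)]
      rw [PySem.Dict.items_insert_of_not_contains d (pvFactorsA num) (by
        simpa using hfresh num hpos le_rfl)]
      have hr : PySem.List.pyRange num 0 (-1) = num :: PySem.List.pyRange (num - 1) 0 (-1) :=
        PySem.List.pyRange_neg_one_cons (by omega)
      rw [hr, List.map_cons, List.append_assoc]
      rfl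
  | case2 num d hpos =>
      rw [factors_dict_go, if_neg hpos]
      rw [PySem.List.pyRange_neg_one_eq_nil (by omega)]
      simp

theorem pv_alt_items (num : Int) :
    factors_dict_alt num
      = (PySem.List.pyRange num 0 (-1)).map (fun k => (k, (pvSieve num).getD k [])) := by
  unfold factors_dict_alt
  rw [PySem.Dict.items_foldl_insert_fresh (PySem.List.pyRange num 0 (-1))
        (fun a => a) (fun k => (pvSieve num).getD k []) PySem.Dict.empty
        (by intro a _; simp)
        (by
          rw [List.map_id']
          rw [PySem.List.pyRange_neg_one_eq_reverse]
          exact List.nodup_reverse.mpr (PySem.List.nodup_pyRange_one (0 + 1) (num + 1)))]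
  rfl

-- ===== VERDICT (by name: the statement is the Claim_ definition above) =====
theorem factors_dict_spec : Claim_equal_factors_dict := by
  unfold Claim_equal_factors_dict
  intro num _
  unfold Spec_factors_dict
  unfold factors_dict
  rw [pv_goA_items num PySem.Dict.empty (by intro j _ _; simp)]
  rw [pv_alt_items num]
  simp only [PySem.Dict.empty, List.nil_append]
  apply List.map_congr_left
  intro k hk
  rw [PySem.List.mem_pyRange_neg_one] at hk
  rw [pv_sieve_getD_eq_factorsA num k hk.1 hk.2]
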